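-- pv_equiv track=rewrite | github.com/titanherow-cmd/macro-merg | merge_macros.py | is_in_drag_sequence
-- ===== SOURCE A (Python) =====
-- def is_in_drag_sequence(events, index):
--     """
--     Check if the given index is inside a drag sequence (between DragStart and DragEnd).
--     Returns True if we're in the middle of a drag.
--     """
--     drag_started = False
--     for j in range(index, -1, -1):
--         event_type = events[j].get("Type", "")
--         if event_type == "DragEnd":
--             return False
--         elif event_type == "DragStart":
--             drag_started = True
--             break
--
--     if not drag_started:
--         return False
--
--     for j in range(index + 1, len(events)):
--         event_type = events[j].get("Type", "")
--         if event_type == "DragEnd":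
--             return True
--         elif event_type == "DragStart":
--             return False
--
--     return False
-- ===== SOURCE B (Python) =====
-- def is_in_drag_sequence(events, index):
--     """Single forward state-machine pass: remember the most recent still-open
--     DragStart; on each DragEnd test whether index lies inside [start, end)."""
--     start = None
--     for i, event in enumerate(events):
--         event_type = event.get("Type", "")
--         if event_type == "DragStart":
--             start = i
--         elif event_type == "DragEnd":
--             if start is not None and start <= index < i:
--                 return True
--             start = None
--     return False
-- ===== Notes on version B (the rewrite author's own statement) =====
-- stated objective: alternative
-- what changed: Replaces A's two directional scans (backward from index for the nearest DragStart/DragEnd marker, then forward for the closing marker) with a single forward state-machine pass that remembers the most recent still-open DragStart and tests start <= index < end at each DragEnd.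
import Mathlib
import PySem

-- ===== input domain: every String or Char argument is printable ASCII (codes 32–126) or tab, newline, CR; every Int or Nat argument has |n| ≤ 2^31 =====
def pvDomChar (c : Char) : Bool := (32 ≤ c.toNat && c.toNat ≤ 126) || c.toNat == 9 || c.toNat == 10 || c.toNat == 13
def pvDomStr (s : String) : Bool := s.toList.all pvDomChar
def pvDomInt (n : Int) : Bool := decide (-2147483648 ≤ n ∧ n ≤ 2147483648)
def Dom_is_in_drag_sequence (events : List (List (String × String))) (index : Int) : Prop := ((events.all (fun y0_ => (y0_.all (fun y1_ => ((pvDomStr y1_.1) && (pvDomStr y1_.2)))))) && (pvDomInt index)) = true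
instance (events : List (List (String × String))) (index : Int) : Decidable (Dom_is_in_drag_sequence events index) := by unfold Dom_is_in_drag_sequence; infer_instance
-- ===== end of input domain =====

-- B replaces A's backward-then-forward two-directional index scans by ONE forward
-- state-machine pass remembering the most recent still-open DragStart (objective: alternative).

-- events[?].get("Type", "")
def eTy (ev : List (String × String)) : String := PySem.Dict.getD (PySem.Dict.mk ev) "Type" ""

-- ===== PORT A =====
-- events[j].get("Type", "")  (pyGetD total form; in-range under Pre_)
def aTyAt (events : List (List (String × String))) (j : Int) : String :=
  eTy (PySem.List.pyGetD events j [])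

-- first backward loop: some false = 'return False', some true = drag_started/break, none = fell through
def aBack (events : List (List (String × String))) : List Int → Option Bool
  | [] => none
  | j :: js =>
    let t := aTyAt events j
    if t == "DragEnd" then some false
    else if t == "DragStart" then some true
    else aBack events js

-- second forward loop
def aFwd (events : List (List (String × String))) : List Int → Bool
  | [] => false
  | j :: js =>
    let t := aTyAt events j
    if t == "DragEnd" then true
    else if t == "DragStart" then false
    else aFwd events js

def is_in_drag_sequence (events : List (List (String × String))) (index : Int) : Bool :=
  match aBack events (PySem.List.pyRange index (-1) (-1)) with
  | some false => false                -- 'return False' inside the backward loop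
  | none => false                      -- 'if not drag_started: return False'
  | some true => aFwd events (PySem.List.pyRange (index + 1) (events.length : Int) 1)

-- ===== PORT B =====
def bLoop (index : Int) (l : List (Int × List (String × String))) (start : Option Int) : Bool :=
  match l with
  | [] => false
  | (i, ev) :: rest =>
    let t := eTy ev
    if t == "DragStart" then bLoop index rest (some i)
    else if t == "DragEnd" then
      if (match start with | some s => decide (s ≤ index ∧ index < i) | none => false)
      then true
      else bLoop index rest none
    else bLoop index rest start

def is_in_drag_sequence_alt (events : List (List (String × String))) (index : Int) : Bool :=
  bLoop index (PySem.List.enumerate events) none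

-- ===== PRECONDITION & SPEC =====
-- A raises IndexError (events[index]) exactly when index >= len(events); every other input,
-- including any negative index, returns normally.
def Pre_is_in_drag_sequence (events : List (List (String × String))) (index : Int) : Prop :=
  index < (events.length : Int)
instance (events : List (List (String × String))) (index : Int) : Decidable (Pre_is_in_drag_sequence events index) := by unfold Pre_is_in_drag_sequence; infer_instance

def pvWitness_is_in_drag_sequence : (List (List (String × String))) × Int :=
  ([[("Type", "DragStart")], [("X", "5")], [("Type", "DragEnd")]], 1)

def Spec_is_in_drag_sequence (events : List (List (String × String))) (index : Int) (out : Bool) : Prop := out = is_in_drag_sequence_alt events index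
instance (events : List (List (String × String))) (index : Int) (out : Bool) : Decidable (Spec_is_in_drag_sequence events index out) := by unfold Spec_is_in_drag_sequence; infer_instance

-- ===== CLAIM (what is proved, stated in full; the proofs are below) =====
def Claim_equal_is_in_drag_sequence : Prop := ∀ (events : List (List (String × String))) (index : Int), Dom_is_in_drag_sequence events index → Pre_is_in_drag_sequence events index → Spec_is_in_drag_sequence events index (is_in_drag_sequence events index)

-- ===== LEMMAS AND PROOFS =====

-- A's backward loop, recursion on the index instead of on the materialised range list
def backRec (events : List (List (String × String))) (idx : Int) : Option Bool :=
  if h : idx < 0 then none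
  else
    let t := aTyAt events idx
    if t == "DragEnd" then some false
    else if t == "DragStart" then some true
    else backRec events (idx - 1)
termination_by (idx + 1).toNat
decreasing_by omega

-- first marker decides: DragEnd → true, DragStart → false, none → false
def fwdL : List (List (String × String)) → Bool
  | [] => false
  | ev :: r =>
    let t := eTy ev
    if t == "DragEnd" then true
    else if t == "DragStart" then false
    else fwdL r

-- A normalised
def AN (events : List (List (String × String))) (idx : Int) : Bool :=
  match backRec events idx with
  | some true => fwdL (events.drop (idx + 1).toNat)
  | _ => false

-- A with an open DragStart just before position 0
def AO (events : List (List (String × String))) (j : Int) : Bool :=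
  if j < 0 then fwdL events
  else
    match backRec events j with
    | some false => false
    | _ => fwdL (events.drop (j + 1).toNat)

-- B normalised: index relative to the current position, open = "an unclosed DragStart at ≤ index exists"
def bM : List (List (String × String)) → Int → Bool → Bool
  | [], _, _ => false
  | ev :: r, idx, op =>
    let t := eTy ev
    if t == "DragStart" then bM r (idx - 1) (decide (0 ≤ idx))
    else if t == "DragEnd" then (if op && decide (idx < 0) then true else bM r (idx - 1) false)
    else bM r (idx - 1) op

theorem backRec_neg (events : List (List (String × String))) (idx : Int) (h : idx < 0) :
    backRec events idx = none := by
  rw [backRec]; simp [h]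

theorem back_eq (events : List (List (String × String))) (idx : Int) :
    aBack events (PySem.List.pyRange idx (-1) (-1)) = backRec events idx := by
  by_cases h : idx < 0
  · rw [PySem.List.pyRange_neg_one_eq_nil (by omega), backRec_neg events idx h]; rfl
  · rw [PySem.List.pyRange_neg_one_cons (by omega : (-1:Int) < idx), backRec]
    simp only [h, dite_false]
    show (if aTyAt events idx == "DragEnd" then some false
          else if aTyAt events idx == "DragStart" then some true
          else aBack events (PySem.List.pyRange (idx - 1) (-1) (-1))) = _
    split_ifs with h1 h2 <;> simp_all [back_eq events (idx - 1)]
termination_by (idx + 1).toNat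
decreasing_by omega

theorem pyGetD_cons (h : List (String × String)) (t : List (List (String × String)))
    (i : Int) (d : List (String × String)) (hi : 1 ≤ i) :
    PySem.List.pyGetD (h :: t) i d = PySem.List.pyGetD t (i - 1) d := by
  have h1 : i.toNat = (i - 1).toNat + 1 := by omega
  rw [PySem.List.pyGetD_of_nonneg _ _ (by omega : (0:Int) ≤ i),
    PySem.List.pyGetD_of_nonneg _ _ (by omega : (0:Int) ≤ i - 1), h1]
  rfl

theorem fwd_eq (events : List (List (String × String))) (k : Int) (hk : 0 ≤ k) :
    aFwd events (PySem.List.pyRange k (events.length : Int) 1) = fwdL (events.drop k.toNat) := by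
  by_cases h : k < (events.length : Int)
  · rw [PySem.List.pyRange_one_cons h]
    have hlt : k.toNat < events.length := by omega
    have hdrop : events.drop k.toNat = events[k.toNat] :: events.drop (k.toNat + 1) :=
      List.drop_eq_getElem_cons hlt
    have hget : aTyAt events k = eTy events[k.toNat] := by
      unfold aTyAt; rw [PySem.List.pyGetD_eq_getElem events [] hk (by omega)]
    rw [hdrop]
    show (if aTyAt events k == "DragEnd" then true
          else if aTyAt events k == "DragStart" then false
          else aFwd events (PySem.List.pyRange (k + 1) (events.length : Int) 1)) = _
    rw [hget, fwd_eq events (k + 1) (by omega)]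
    have : (k + 1).toNat = k.toNat + 1 := by omega
    rw [this]; rfl
  · rw [PySem.List.pyRange_one_eq_nil (by omega), List.drop_eq_nil_of_le (by omega)]; rfl
termination_by (events.length - k).toNat
decreasing_by omega

theorem A_eq_AN (events : List (List (String × String))) (idx : Int) :
    is_in_drag_sequence events idx = AN events idx := by
  unfold is_in_drag_sequence AN
  rw [back_eq]
  rcases hb : backRec events idx with _ | b
  · rfl
  · have hnn : ¬ idx < 0 := fun h => by rw [backRec_neg events idx h] at hb; cases hb
    cases b
    · rfl
    · exact fwd_eq events (idx + 1) (by omega)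

theorem alt_eq_bM_gen (events : List (List (String × String))) (index : Int) :
    ∀ (s : Int) (st : Option Int),
      bLoop index (PySem.List.enumerate events s) st =
        bM events (index - s) (match st with | some x => decide (x ≤ index) | none => false) := by
  induction events with
  | nil => intro s st; rfl
  | cons h t ih =>
    intro s st
    rw [PySem.List.enumerate_cons]
    show (if eTy h == "DragStart" then bLoop index (PySem.List.enumerate t (s+1)) (some s)
          else if eTy h == "DragEnd" then
            (if (match st with | some x => decide (x ≤ index ∧ index < s) | none => false)
             then true else bLoop index (PySem.List.enumerate t (s+1)) none)
          else bLoop index (PySem.List.enumerate t (s+1)) st) = _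
    show _ = (if eTy h == "DragStart" then bM t (index - s - 1) (decide (0 ≤ index - s))
              else if eTy h == "DragEnd" then
                (if (match st with | some x => decide (x ≤ index) | none => false) && decide (index - s < 0)
                 then true else bM t (index - s - 1) false)
              else bM t (index - s - 1) (match st with | some x => decide (x ≤ index) | none => false))
    by_cases h1 : eTy h == "DragStart"
    · simp only [h1, if_true]
      rw [ih (s + 1) (some s)]
      have e2 : decide (s ≤ index) = decide (0 ≤ index - s) := by
        simp only [decide_eq_decide]; omega
      show bM t (index - (s + 1)) (decide (s ≤ index)) = _
      rw [show index - (s + 1) = index - s - 1 by omega, e2]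
    · by_cases h2 : eTy h == "DragEnd"
      · simp only [h1, h2, if_true, Bool.false_eq_true, if_false]
        have e3 : (match st with | some x => decide (x ≤ index ∧ index < s) | none => false)
            = ((match st with | some x => decide (x ≤ index) | none => false) && decide (index - s < 0)) := by
          rcases st with _ | x
          · rfl
          · show decide (x ≤ index ∧ index < s) = (decide (x ≤ index) && decide (index - s < 0))
            have e4 : decide (index - s < 0) = decide (index < s) := by
              simp only [decide_eq_decide]; omega
            rw [e4, Bool.decide_and]
        rw [e3, ih (s + 1) none]
        show (if _ then true else bM t (index - (s + 1)) false) = _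
        rw [show index - (s + 1) = index - s - 1 by omega]
      · simp only [h1, h2, Bool.false_eq_true, if_false]
        rw [ih (s + 1) st, show index - (s + 1) = index - s - 1 by omega]

theorem alt_eq_bM (events : List (List (String × String))) (index : Int) :
    is_in_drag_sequence_alt events index = bM events index false := by
  unfold is_in_drag_sequence_alt
  have := alt_eq_bM_gen events index 0 none
  simpa using this

theorem backRec_nil (idx : Int) : backRec ([] : List (List (String × String))) idx = none := by
  rw [backRec]
  split_ifs with h1
  · rfl
  · have hty : aTyAt ([] : List (List (String × String))) idx = "" := by
      unfold aTyAt eTy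
      simp [PySem.List.pyGetD, PySem.List.pyGet?, PySem.Dict.getD, PySem.Dict.get?]
    rw [hty]
    simp only [show (("" == "DragEnd") = false) by decide, show (("" == "DragStart") = false) by decide]
    exact backRec_nil (idx - 1)
termination_by (idx + 1).toNat
decreasing_by omega

theorem backRec_some_nonneg {t : List (List (String × String))} {j : Int} {b : Bool}
    (hb : backRec t j = some b) : 0 ≤ j := by
  by_contra hn
  rw [backRec_neg t j (by omega)] at hb
  cases hb

theorem bM_cons (ev : List (String × String)) (r : List (List (String × String)))
    (idx : Int) (op : Bool) :
    bM (ev :: r) idx op =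
      (if eTy ev == "DragStart" then bM r (idx - 1) (decide (0 ≤ idx))
       else if eTy ev == "DragEnd" then (if op && decide (idx < 0) then true else bM r (idx - 1) false)
       else bM r (idx - 1) op) := rfl

theorem fwdL_cons (ev : List (String × String)) (r : List (List (String × String))) :
    fwdL (ev :: r) =
      (if eTy ev == "DragEnd" then true else if eTy ev == "DragStart" then false else fwdL r) := rfl

theorem bM_false_of_neg (t : List (List (String × String))) :
    ∀ idx : Int, idx < 0 → bM t idx false = false := by
  induction t with
  | nil => intro idx _; rfl
  | cons h r ih =>
    intro idx hidx
    rw [bM_cons]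
    rw [show decide ((0:Int) ≤ idx) = false by simp; omega]
    have hrec := ih (idx - 1) (by omega)
    split_ifs <;> simp_all

theorem bM_true_of_neg (t : List (List (String × String))) :
    ∀ idx : Int, idx < 0 → bM t idx true = fwdL t := by
  induction t with
  | nil => intro idx _; rfl
  | cons h r ih =>
    intro idx hidx
    rw [bM_cons, fwdL_cons]
    rw [show decide ((0:Int) ≤ idx) = false by simp; omega,
      show decide (idx < 0) = true by simp [hidx]]
    have hrec := ih (idx - 1) (by omega)
    have hrec0 := bM_false_of_neg r (idx - 1) (by omega)
    by_cases hS : eTy h == "DragStart" <;> by_cases hE : eTy h == "DragEnd" <;>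
      simp_all

theorem backRec_cons (h : List (String × String)) (t : List (List (String × String)))
    (idx : Int) (hidx : 0 ≤ idx) :
    backRec (h :: t) idx =
      match backRec t (idx - 1) with
      | none =>
        (if eTy h == "DragEnd" then some false
         else if eTy h == "DragStart" then some true
         else none)
      | r => r := by
  by_cases h0 : idx = 0
  · subst h0
    rw [backRec_neg t (0 - 1) (by omega)]
    show backRec (h :: t) 0 =
      (if eTy h == "DragEnd" then some false
       else if eTy h == "DragStart" then some true
       else none)
    rw [backRec]
    have hty : aTyAt (h :: t) 0 = eTy h := by
      unfold aTyAt; rw [PySem.List.pyGetD_zero_cons]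
    simp only [show ¬ (0:Int) < 0 by omega, dite_false, hty]
    split_ifs <;> first | rfl | exact backRec_neg (h :: t) (0 - 1) (by omega)
  · have h1 : ¬ idx - 1 < 0 := by omega
    have hty : aTyAt (h :: t) idx = aTyAt t (idx - 1) := by
      unfold aTyAt; rw [pyGetD_cons h t idx [] (by omega)]
    by_cases hE : aTyAt t (idx - 1) == "DragEnd"
    · have hR : backRec t (idx - 1) = some false := by
        rw [backRec]; simp only [h1, dite_false, hE, if_true]
      rw [backRec, hR]
      simp only [show ¬ idx < 0 by omega, dite_false, hty, hE, if_true]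
    · by_cases hS : aTyAt t (idx - 1) == "DragStart"
      · have hR : backRec t (idx - 1) = some true := by
          rw [backRec]
          simp only [h1, dite_false, hE, hS, if_true, Bool.false_eq_true, if_false]
        rw [backRec, hR]
        simp only [show ¬ idx < 0 by omega, dite_false, hty, hE, hS, if_true,
          Bool.false_eq_true, if_false]
      · have hR : backRec t (idx - 1) = backRec t (idx - 1 - 1) := by
          conv_lhs => rw [backRec]
          simp only [h1, dite_false, hE, hS, Bool.false_eq_true, if_false]
        rw [backRec, hR]
        simp only [show ¬ idx < 0 by omega, dite_false, hty, hE, hS,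
          Bool.false_eq_true, if_false]
        exact backRec_cons h t (idx - 1) (by omega)
termination_by (idx + 1).toNat
decreasing_by omega

theorem main_eq (events : List (List (String × String))) :
    ∀ idx : Int, (AN events idx = bM events idx false) ∧ (AO events idx = bM events idx true) := by
  induction events with
  | nil =>
    intro idx
    refine ⟨?_, ?_⟩
    · unfold AN; rw [backRec_nil idx]; rfl
    · unfold AO; rw [backRec_nil idx]
      split_ifs with hn
      · rfl
      · simp only [List.drop_nil]; rfl
  | cons h t ih =>
    intro idx
    have hAN : ∀ j : Int, AN t j = bM t j false := fun j => (ih j).1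
    have hAO : ∀ j : Int, AO t j = bM t j true := fun j => (ih j).2
    refine ⟨?_, ?_⟩
    · by_cases hneg : idx < 0
      · unfold AN
        rw [backRec_neg _ idx hneg, bM_false_of_neg _ idx hneg]
      · have h0 : (0:Int) ≤ idx := by omega
        have hc := backRec_cons h t idx h0
        have hdrop : (h :: t).drop (idx + 1).toNat = t.drop idx.toNat := by
          rw [show (idx + 1).toNat = idx.toNat + 1 by omega, List.drop_succ_cons]
        have hd1 : (idx - 1 + 1) = idx := by omega
        rw [bM_cons, show decide ((0:Int) ≤ idx) = true by simp [h0]]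
        unfold AN
        rw [hc, hdrop]
        rcases hb : backRec t (idx - 1) with _ | b
        · by_cases hS : eTy h == "DragStart"
          · have hE : (eTy h == "DragEnd") = false := by
              rw [beq_iff_eq] at hS; rw [hS]; decide
            simp only [hS, hE, if_true, Bool.false_eq_true, if_false]
            rw [← hAO (idx - 1)]
            unfold AO
            by_cases hz : idx - 1 < 0
            · rw [if_pos hz, show idx.toNat = 0 by omega, List.drop_zero]
            · rw [if_neg hz, hb, hd1]
          · by_cases hE : eTy h == "DragEnd"
            · simp only [hS, hE, if_true, Bool.false_eq_true, if_false, Bool.false_and]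
              rw [← hAN (idx - 1)]
              unfold AN
              rw [hb]
            · simp only [hS, hE, Bool.false_eq_true, if_false]
              rw [← hAN (idx - 1)]
              unfold AN
              rw [hb]
        · have hnz : ¬ idx - 1 < 0 := by have := backRec_some_nonneg hb; omega
          have hAval : AN t (idx - 1) =
              (match (some b : Option Bool) with
               | some true => fwdL (t.drop idx.toNat)
               | _ => false) := by
            unfold AN; rw [hb, hd1]
          have hOval : AO t (idx - 1) =
              (match (some b : Option Bool) with
               | some false => false
               | _ => fwdL (t.drop idx.toNat)) := by
            unfold AO; rw [if_neg hnz, hb, hd1]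
          by_cases hS : eTy h == "DragStart"
          · simp only [hS, if_true]
            rw [← hAO (idx - 1), hOval]
            all_goals (cases b <;> rfl)
          · by_cases hE : eTy h == "DragEnd" <;>
              simp only [hS, hE, if_true, Bool.false_eq_true, if_false, Bool.false_and] <;>
              rw [← hAN (idx - 1), hAval]
    · by_cases hneg : idx < 0
      · unfold AO
        rw [if_pos hneg, bM_true_of_neg _ idx hneg]
      · have h0 : (0:Int) ≤ idx := by omega
        have hc := backRec_cons h t idx h0
        have hdrop : (h :: t).drop (idx + 1).toNat = t.drop idx.toNat := by
          rw [show (idx + 1).toNat = idx.toNat + 1 by omega, List.drop_succ_cons]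
        have hd1 : (idx - 1 + 1) = idx := by omega
        rw [bM_cons, show decide ((0:Int) ≤ idx) = true by simp [h0],
          show decide (idx < 0) = false by simp [hneg]]
        unfold AO
        rw [if_neg hneg, hc, hdrop]
        rcases hb : backRec t (idx - 1) with _ | b
        · by_cases hS : eTy h == "DragStart"
          · have hE : (eTy h == "DragEnd") = false := by
              rw [beq_iff_eq] at hS; rw [hS]; decide
            simp only [hS, hE, if_true, Bool.false_eq_true, if_false]
            rw [← hAO (idx - 1)]
            unfold AO
            by_cases hz : idx - 1 < 0
            · rw [if_pos hz, show idx.toNat = 0 by omega, List.drop_zero]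
            · rw [if_neg hz, hb, hd1]
          · by_cases hE : eTy h == "DragEnd"
            · simp only [hS, hE, if_true, Bool.false_eq_true, if_false, Bool.true_and]
              rw [← hAN (idx - 1)]
              unfold AN
              rw [hb]
            · simp only [hS, hE, Bool.false_eq_true, if_false]
              rw [← hAO (idx - 1)]
              unfold AO
              by_cases hz : idx - 1 < 0
              · rw [if_pos hz, show idx.toNat = 0 by omega, List.drop_zero]
              · rw [if_neg hz, hb, hd1]
        · have hnz : ¬ idx - 1 < 0 := by have := backRec_some_nonneg hb; omega
          have hAval : AN t (idx - 1) =
              (match (some b : Option Bool) with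
               | some true => fwdL (t.drop idx.toNat)
               | _ => false) := by
            unfold AN; rw [hb, hd1]
          have hOval : AO t (idx - 1) =
              (match (some b : Option Bool) with
               | some false => false
               | _ => fwdL (t.drop idx.toNat)) := by
            unfold AO; rw [if_neg hnz, hb, hd1]
          by_cases hS : eTy h == "DragStart"
          · simp only [hS, if_true]
            rw [← hAO (idx - 1), hOval]
          · by_cases hE : eTy h == "DragEnd"
            · simp only [hS, hE, if_true, Bool.false_eq_true, if_false, Bool.true_and]
              rw [← hAN (idx - 1), hAval]
              cases b <;> rfl
            · simp only [hS, hE, Bool.false_eq_true, if_false]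
              rw [← hAO (idx - 1), hOval]

-- ===== VERDICT (by name: the statement is the Claim_ definition above) =====
theorem is_in_drag_sequence_spec : Claim_equal_is_in_drag_sequence := by
  intro events index _ _
  unfold Spec_is_in_drag_sequence
  rw [A_eq_AN, alt_eq_bM, (main_eq events index).1]
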